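-- pv_equiv track=rewrite | github.com/AntonelloDN/lb_envimet | lb_envimet/envimetObj/grid.py | createOneMatrixForBuildings
-- ===== SOURCE A (Python) =====
-- def createOneMatrixForBuildings(buildings, nestedLayers):
--     # merge Matrix
--     oneMatrix = []
--     for k in zip(*nestedLayers):
--         columns = []
--         for y in zip(*k):
--             rows = []
--             for x in zip(*y):
--                 total = sum(x)
--                 # overlap issue ;)
--                 if total > len(buildings):
--                     total = 0
--                 rows.append(total)
--             columns.append(rows)
--         oneMatrix.append(columns)
--
--     return oneMatrix
-- ===== SOURCE B (Python) =====
-- def createOneMatrixForBuildings(buildings, nestedLayers):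
--     # Accumulate whole layers instead of transposing and summing per cell.
--     if not nestedLayers:
--         return []
--     acc = [[list(row) for row in layer] for layer in nestedLayers[0]]
--     for layer in nestedLayers[1:]:
--         acc = [[[a + b for a, b in zip(ra, rb)]
--                 for ra, rb in zip(la, lb)]
--                for la, lb in zip(acc, layer)]
--     cap = len(buildings)
--     return [[[0 if v > cap else v for v in row] for row in layer] for layer in acc]
-- ===== Notes on version B (the rewrite author's own statement) =====
-- stated objective: alternative
-- what changed: B accumulates whole layers with a left fold of element-wise matrix addition (zip-based zipWith at each level) and applies the cap in one final pass, instead of A's triple transpose (zip(*...)) with a per-cell sum-and-cap.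
import Mathlib
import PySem

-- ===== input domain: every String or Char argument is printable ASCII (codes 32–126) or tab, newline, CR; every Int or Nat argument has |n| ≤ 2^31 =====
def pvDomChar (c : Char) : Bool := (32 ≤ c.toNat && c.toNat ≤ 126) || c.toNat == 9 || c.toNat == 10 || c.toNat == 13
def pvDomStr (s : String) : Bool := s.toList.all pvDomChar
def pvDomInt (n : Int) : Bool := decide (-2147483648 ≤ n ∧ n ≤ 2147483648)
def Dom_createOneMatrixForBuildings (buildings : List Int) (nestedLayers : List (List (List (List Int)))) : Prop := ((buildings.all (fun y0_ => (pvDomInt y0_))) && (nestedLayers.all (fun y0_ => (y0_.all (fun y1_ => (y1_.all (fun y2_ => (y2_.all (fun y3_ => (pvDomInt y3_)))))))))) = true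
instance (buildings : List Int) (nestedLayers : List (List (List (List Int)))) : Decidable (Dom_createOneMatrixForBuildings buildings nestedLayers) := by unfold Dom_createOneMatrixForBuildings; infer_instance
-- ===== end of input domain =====

-- B sums the layers with a left fold of element-wise matrix addition and caps once at the
-- end, instead of A's triple zip(*...) transpose with per-cell sum-and-cap (objective: alternative).

-- ===== PORT A =====
-- Python's zip(*xs): truncate to the shortest list, pairing positionally (exact; headD's
-- default is never used because the guard ensures every list is nonempty).
def pyZipStar {α : Type} [Inhabited α] (xs : List (List α)) : List (List α) :=
  if h : xs ≠ [] ∧ ∀ l ∈ xs, l ≠ [] then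
    (xs.map (fun l => l.headD default)) :: pyZipStar (xs.map List.tail)
  else []
termination_by (xs.headD []).length
decreasing_by
  obtain ⟨hne, hall⟩ := h
  cases xs with
  | nil => exact absurd rfl hne
  | cons a rest =>
    have ha := hall a (by simp)
    cases a with
    | nil => exact absurd rfl ha
    | cons x a' => simp

def createOneMatrixForBuildings (buildings : List Int) (nestedLayers : List (List (List (List Int)))) : List (List (List Int)) :=
  (pyZipStar nestedLayers).map (fun k =>
    (pyZipStar k).map (fun y =>
      (pyZipStar y).map (fun x =>
        let total := x.sum
        if total > (buildings.length : Int) then 0 else total)))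

-- ===== PORT B =====
-- element-wise sum of two 3D matrices (zip truncates to the shorter operand at each level)
def pvAddM (a b : List (List (List Int))) : List (List (List Int)) :=
  List.zipWith (fun la lb => List.zipWith (fun ra rb => List.zipWith (· + ·) ra rb) la lb) a b

def createOneMatrixForBuildings_alt (buildings : List Int) (nestedLayers : List (List (List (List Int)))) : List (List (List Int)) :=
  match nestedLayers with
  | [] => []
  | h :: t =>
    (t.foldl pvAddM h).map (fun layer =>
      layer.map (fun row =>
        row.map (fun v => if v > (buildings.length : Int) then 0 else v)))

-- ===== PRECONDITION & SPEC =====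
def Spec_createOneMatrixForBuildings (buildings : List Int) (nestedLayers : List (List (List (List Int)))) (out : List (List (List Int))) : Prop := out = createOneMatrixForBuildings_alt buildings nestedLayers
instance (buildings : List Int) (nestedLayers : List (List (List (List Int)))) (out : List (List (List Int))) : Decidable (Spec_createOneMatrixForBuildings buildings nestedLayers out) := by unfold Spec_createOneMatrixForBuildings; infer_instance

-- ===== CLAIM (what is proved, stated in full; the proofs are below) =====
def Claim_equal_createOneMatrixForBuildings : Prop := ∀ (buildings : List Int) (nestedLayers : List (List (List (List Int)))), Dom_createOneMatrixForBuildings buildings nestedLayers → Spec_createOneMatrixForBuildings buildings nestedLayers (createOneMatrixForBuildings buildings nestedLayers)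

-- ===== LEMMAS AND PROOFS =====

-- zip(*xs) is empty as soon as one of the lists is empty
theorem pyZipStar_nil_of_mem {α : Type} [Inhabited α] (xs : List (List α)) (h : [] ∈ xs) :
    pyZipStar xs = [] := by
  rw [pyZipStar]
  have hc : ¬(xs ≠ [] ∧ ∀ l ∈ xs, l ≠ []) := by
    rintro ⟨_, h2⟩; exact h2 [] h rfl
  simp [hc]

-- one unfolding step of zip(*xs) when every list is nonempty
theorem pyZipStar_cons {α : Type} [Inhabited α] (xs : List (List α)) (h1 : xs ≠ [])
    (h2 : ∀ l ∈ xs, l ≠ []) :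
    pyZipStar xs = (xs.map (fun l => l.headD default)) :: pyZipStar (xs.map List.tail) := by
  rw [pyZipStar, dif_pos ⟨h1, h2⟩]

-- zip(*xs) is empty when some list is empty
theorem pyZipStar_eq_nil {α : Type} [Inhabited α] (xs : List (List α))
    (h : ¬ ∀ l ∈ xs, l ≠ []) : pyZipStar xs = [] := by
  rw [pyZipStar, dif_neg]
  rintro ⟨_, hc⟩; exact h hc

theorem pyZipStar_nil {α : Type} [Inhabited α] : pyZipStar ([] : List (List α)) = [] := by
  rw [pyZipStar, dif_neg]
  rintro ⟨hc, _⟩; exact hc rfl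

-- zip(*[h]) wraps each element in a singleton
theorem pyZipStar_single {α : Type} [Inhabited α] (h : List α) :
    pyZipStar [h] = h.map (fun a => [a]) := by
  induction h with
  | nil => exact pyZipStar_nil_of_mem _ (by simp)
  | cons a h' ih =>
    rw [pyZipStar_cons _ (by simp) (by simp)]
    simp [ih]

-- merging two adjacent layers with g before transposing does not change (map f ∘ zip*),
-- provided f absorbs g on the first two components
theorem pyZipStar_pair {α β : Type} [Inhabited α] (f : List α → β) (g : α → α → α)
    (hf : ∀ x y rest, f (x :: y :: rest) = f (g x y :: rest)) :
    ∀ (a b : List α) (rest : List (List α)),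
      (pyZipStar (a :: b :: rest)).map f = (pyZipStar (List.zipWith g a b :: rest)).map f := by
  intro a
  induction a with
  | nil =>
    intro b rest
    rw [pyZipStar_nil_of_mem _ (by simp), pyZipStar_nil_of_mem _ (by simp [List.zipWith])]
  | cons x a' ih =>
    intro b rest
    cases b with
    | nil =>
      rw [pyZipStar_nil_of_mem _ (by simp), pyZipStar_nil_of_mem _ (by simp [List.zipWith])]
    | cons y b' =>
      by_cases hr : ∀ l ∈ rest, l ≠ []
      · rw [pyZipStar_cons ((x :: a') :: (y :: b') :: rest) (by simp)
            (by intro l hl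
                rcases List.mem_cons.mp hl with rfl | hl'
                · simp
                rcases List.mem_cons.mp hl' with rfl | hl''
                · simp
                · exact hr l hl'')]
        rw [pyZipStar_cons (List.zipWith g (x :: a') (y :: b') :: rest) (by simp)
            (by intro l hl
                rcases List.mem_cons.mp hl with rfl | hl'
                · simp
                · exact hr l hl')]
        simp only [List.map_cons, List.headD_cons, List.zipWith_cons_cons, List.tail_cons]
        rw [hf x y, ih b' (rest.map List.tail)]
      · rw [pyZipStar_eq_nil _ (fun hc => hr (fun l hl => hc l (by simp [hl]))),
            pyZipStar_eq_nil _ (fun hc => hr (fun l hl => hc l (by simp [hl])))]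

-- the transpose-then-reduce of A equals the fold-then-finish of B, generically in the level
theorem pyZipStar_foldl {α β : Type} [Inhabited α] (f : List α → β) (g : α → α → α)
    (hf : ∀ x y rest, f (x :: y :: rest) = f (g x y :: rest)) :
    ∀ (t : List (List α)) (h : List α),
      (pyZipStar (h :: t)).map f = (t.foldl (List.zipWith g) h).map (fun a => f [a]) := by
  intro t
  induction t with
  | nil => intro h; simp [pyZipStar_single, List.map_map, Function.comp]
  | cons b t' ih =>
    intro h
    rw [pyZipStar_pair f g hf h b t', ih (List.zipWith g h b)]
    rfl

-- A's per-cell reducer applied to a single layer is the plain cap map over that layer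
theorem cap_single (c : Int) (a : List (List Int)) :
    (pyZipStar [a]).map (fun y =>
        (pyZipStar y).map (fun x => if x.sum > c then 0 else x.sum))
    = a.map (fun row => row.map (fun v => if v > c then 0 else v)) := by
  rw [pyZipStar_single, List.map_map]
  apply List.map_congr_left
  intro row _
  simp [Function.comp, pyZipStar_single, List.map_map]

-- ===== VERDICT (by name: the statement is the Claim_ definition above) =====
theorem createOneMatrixForBuildings_spec : Claim_equal_createOneMatrixForBuildings := by
  intro buildings nestedLayers _
  unfold Spec_createOneMatrixForBuildings createOneMatrixForBuildings createOneMatrixForBuildings_alt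
  cases nestedLayers with
  | nil => rw [pyZipStar_nil]; rfl
  | cons h t =>
    have hf3 : ∀ (x y : Int) (rest : List Int),
        (fun (l : List Int) => if l.sum > (buildings.length : Int) then 0 else l.sum)
            (x :: y :: rest)
        = (fun (l : List Int) => if l.sum > (buildings.length : Int) then 0 else l.sum)
            ((x + y) :: rest) := by
      intro x y rest; simp [add_assoc]
    have hf2 := pyZipStar_pair
      (fun (l : List Int) => if l.sum > (buildings.length : Int) then 0 else l.sum)
      (· + ·) hf3
    have hf1 := pyZipStar_pair
      (fun (y : List (List Int)) => (pyZipStar y).map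
        (fun l => if l.sum > (buildings.length : Int) then 0 else l.sum))
      (List.zipWith (· + ·)) hf2
    have main := pyZipStar_foldl
      (fun (k : List (List (List Int))) => (pyZipStar k).map
        (fun y => (pyZipStar y).map
          (fun l => if l.sum > (buildings.length : Int) then 0 else l.sum)))
      (List.zipWith (List.zipWith (· + ·))) hf1 t h
    exact main.trans (List.map_congr_left (fun a _ => cap_single (buildings.length : Int) a))
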